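-- pv_equiv track=rewrite | github.com/dylanpinn/FIT3155 | assignments/assignment03/q1/elias_encoder.py | encode_single_value
-- ===== SOURCE A (Python) =====
-- def encode_single_value(number_to_encode: int) -> str:
--     # Convert to binary string
--     n = convert_to_binary(number_to_encode)
--
--     l_values = []
--     l_x = len(n) - 1
--     while l_x > 1:
--         encoded_l_x = convert_to_binary(l_x)
--         # flip first bit of binary string
--         encoded_l_x_list = list(encoded_l_x)
--         encoded_l_x_list[0] = "0"
--         encoded_l_x = "".join(encoded_l_x_list)
--         l_values.append(encoded_l_x)
--         l_x = len(encoded_l_x) - 1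
--
--     if number_to_encode > 1:
--         # Add value for 1
--         l_values.append("0")
--         l_values.reverse()
--
--     # Join length values with actual value.
--     return "".join(l_values) + n  # type: ignore
--
-- def convert_to_binary(integer: int) -> str:
--     return bin(integer)[2:]
-- ===== SOURCE B (Python) =====
-- def convert_to_binary(integer):
--     return bin(integer)[2:]
--
-- def encode_single_value(number_to_encode: int) -> str:
--     n = convert_to_binary(number_to_encode)
--
--     def encode_length(l_x):
--         if l_x > 1:
--             group = "0" + convert_to_binary(l_x)[1:]
--             return encode_length(len(group) - 1) + group
--         return "0" if number_to_encode > 1 else ""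
--
--     return encode_length(len(n) - 1) + n
-- ===== Notes on version B (the rewrite author's own statement) =====
-- stated objective: simpler
-- what changed: Replaces A's accumulator-list while-loop plus conditional reverse/join with a direct recursive length-group builder that emits the groups in final order.
-- outside the precondition, e.g. on encode_single_value(-16): A returns '00100b10000', B returns '00001b10000'; on encode_single_value(-5): A returns '01b101', B returns '01b101'
import Mathlib
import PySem

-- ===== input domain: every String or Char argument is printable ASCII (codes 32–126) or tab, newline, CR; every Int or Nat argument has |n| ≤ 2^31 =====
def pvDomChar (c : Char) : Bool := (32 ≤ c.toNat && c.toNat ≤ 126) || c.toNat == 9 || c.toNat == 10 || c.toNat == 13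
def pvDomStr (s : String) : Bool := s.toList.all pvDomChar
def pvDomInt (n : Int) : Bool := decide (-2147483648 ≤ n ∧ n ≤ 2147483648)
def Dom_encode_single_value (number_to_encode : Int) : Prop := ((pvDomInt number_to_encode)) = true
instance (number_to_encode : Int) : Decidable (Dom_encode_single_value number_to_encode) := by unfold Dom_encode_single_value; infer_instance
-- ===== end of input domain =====

-- B replaces A's accumulator-list while-loop + conditional reverse/join by a direct
-- recursion that emits the length groups in final order (objective: simpler).

-- shared helper: the digits of bin(n) for n ≥ 1 (empty for 0); bin(i)[2:] is built from it below
def natBits : Nat → List Char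
  | 0 => []
  | n+1 => natBits ((n+1)/2) ++ [if (n+1) % 2 = 1 then '1' else '0']

-- termination bound cited by both ports' loops
theorem natBits_length_le : ∀ n : Nat, (natBits n).length ≤ n := by
  intro n
  induction n using Nat.strong_induction_on with
  | _ n ih =>
    match n with
    | 0 => simp [natBits]
    | m+1 =>
      have h := ih ((m+1)/2) (by omega)
      simp only [natBits, List.length_append, List.length_cons, List.length_nil]
      omega

-- exact port of convert_to_binary: bin(integer)[2:] as a character list
-- (bin(-k) = '-0b…' so [2:] keeps a stray 'b'; bin(0)[2:] = '0')
def convert_to_binary_list (i : Int) : List Char :=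
  if i < 0 then 'b' :: natBits (-i).toNat
  else if i = 0 then ['0'] else natBits i.toNat

theorem conv_len_le (l : Int) (h : 1 < l) : (convert_to_binary_list l).length ≤ l.toNat := by
  unfold convert_to_binary_list
  rw [if_neg (by omega), if_neg (by omega)]
  have := natBits_length_le l.toNat
  omega

-- ===== PORT A =====
-- A's list surgery: encoded_l_x_list[0] = "0"
def flipFirst : List Char → List Char
  | [] => []
  | _ :: t => '0' :: t

theorem flipFirst_length (s : List Char) : (flipFirst s).length = s.length := by
  cases s <;> simp [flipFirst]

def aWhile (l_values : List (List Char)) (l_x : Int) : List (List Char) :=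
  if h : 1 < l_x then
    let encoded := flipFirst (convert_to_binary_list l_x)
    aWhile (l_values ++ [encoded]) ((encoded.length : Int) - 1)
  else l_values
termination_by l_x.toNat
decreasing_by
  have h1 := conv_len_le l_x h
  have h2 := flipFirst_length (convert_to_binary_list l_x)
  omega

def encode_single_value (number_to_encode : Int) : String :=
  let n := convert_to_binary_list number_to_encode
  let l_values := aWhile [] ((n.length : Int) - 1)
  let l_values := if 1 < number_to_encode then (l_values ++ [['0']]).reverse else l_values
  String.mk (l_values.flatten ++ n)

-- ===== PORT B =====
def encode_length (number_to_encode : Int) (l_x : Int) : List Char :=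
  if h : 1 < l_x then
    let group := '0' :: (convert_to_binary_list l_x).tail
    encode_length number_to_encode ((group.length : Int) - 1) ++ group
  else if 1 < number_to_encode then ['0'] else []
termination_by l_x.toNat
decreasing_by
  have h1 := conv_len_le l_x h
  have h2 := List.length_tail (l := convert_to_binary_list l_x)
  simp only [List.length_cons]
  omega

def encode_single_value_alt (number_to_encode : Int) : String :=
  let n := convert_to_binary_list number_to_encode
  String.mk (encode_length number_to_encode ((n.length : Int) - 1) ++ n)

-- ===== PRECONDITION & SPEC =====
-- Pre_ excludes negative inputs: there bin() slicing leaves a stray 'b' in the output and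
-- A's unreversed group order is an accident of its loop — neither output is a meaningful
-- encoding, so nothing is claimed about them.
def Pre_encode_single_value (number_to_encode : Int) : Prop := 0 ≤ number_to_encode
instance (number_to_encode : Int) : Decidable (Pre_encode_single_value number_to_encode) := by
  unfold Pre_encode_single_value; infer_instance
def pvWitness_encode_single_value : Int := 5

def Spec_encode_single_value (number_to_encode : Int) (out : String) : Prop := out = encode_single_value_alt number_to_encode
instance (number_to_encode : Int) (out : String) : Decidable (Spec_encode_single_value number_to_encode out) := by unfold Spec_encode_single_value; infer_instance

-- ===== CLAIM (what is proved, stated in full; the proofs are below) =====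
def Claim_equal_encode_single_value : Prop := ∀ (number_to_encode : Int), Dom_encode_single_value number_to_encode → Pre_encode_single_value number_to_encode → Spec_encode_single_value number_to_encode (encode_single_value number_to_encode)

-- ===== LEMMAS AND PROOFS =====

-- the sequence of length groups produced by A's loop / B's recursion, head = outermost
def groupsOf (l_x : Int) : List (List Char) :=
  if h : 1 < l_x then
    flipFirst (convert_to_binary_list l_x) ::
      groupsOf (((flipFirst (convert_to_binary_list l_x)).length : Int) - 1)
  else []
termination_by l_x.toNat
decreasing_by
  have h1 := conv_len_le l_x h
  have h2 := flipFirst_length (convert_to_binary_list l_x)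
  omega

theorem aWhile_eq (acc : List (List Char)) (l_x : Int) : aWhile acc l_x = acc ++ groupsOf l_x := by
  fun_induction aWhile acc l_x with
  | case1 acc l_x h encoded ih =>
      rw [groupsOf, dif_pos h]
      simpa using ih
  | case2 acc l_x h =>
      rw [groupsOf, dif_neg h, List.append_nil]

theorem flipFirst_eq_cons_tail (l : Int) (h : 1 < l) :
    flipFirst (convert_to_binary_list l) = '0' :: (convert_to_binary_list l).tail := by
  have hle : (convert_to_binary_list l).length ≤ l.toNat := conv_len_le l h
  unfold convert_to_binary_list at *
  rw [if_neg (by omega), if_neg (by omega)]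
  rcases hn : l.toNat with _ | m
  · omega
  · simp only [natBits]
    cases natBits ((m + 1) / 2) <;> simp [flipFirst]

theorem encode_length_eq (x l_x : Int) :
    encode_length x l_x = (if 1 < x then ['0'] else []) ++ (groupsOf l_x).reverse.flatten := by
  fun_induction encode_length x l_x with
  | case1 l_x h group ih =>
      rw [groupsOf, dif_pos h]
      rw [flipFirst_eq_cons_tail l_x h] at *
      simp only [List.reverse_cons, List.flatten_append, List.flatten_cons, List.flatten_nil,
        List.append_nil, ← List.append_assoc]
      rw [ih]
  | case2 l_x h hx =>
      rw [groupsOf, dif_neg h]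
      simp [hx]
  | case3 l_x h hx =>
      rw [groupsOf, dif_neg h]
      simp [hx]

theorem conv_len_one (x : Int) (h0 : 0 ≤ x) (h1 : ¬ 1 < x) :
    (convert_to_binary_list x).length = 1 := by
  have : x = 0 ∨ x = 1 := by omega
  rcases this with rfl | rfl <;> simp [convert_to_binary_list, natBits]

-- ===== VERDICT (by name: the statement is the Claim_ definition above) =====
theorem encode_single_value_spec : Claim_equal_encode_single_value := by
  intro x _ hpre
  unfold Spec_encode_single_value encode_single_value encode_single_value_alt
  dsimp only
  rw [aWhile_eq, encode_length_eq]
  by_cases hx : 1 < x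
  · simp [hx, List.reverse_append]
  · have hlen := conv_len_one x hpre hx
    rw [hlen]
    norm_num
    rw [groupsOf, dif_neg (by norm_num)]
    simp [hx]
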